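-- pv_equiv track=rewrite | github.com/jupyter/nbconvert-examples | doctest/prepend_prompt.py | prepend_prompt
-- ===== SOURCE A (Python) =====
-- def prepend_prompt(text):
--     prompt = '>>> '
--     result = []
--     index = 0
--     while index != -1:
--         old_index = index
--         index = text.find('\n', index)
--         if index != -1:
--             index += 1
--             result.append(prompt + text[old_index:index])
--             prompt = '... '
--     if old_index == 0 or text[old_index:]:
--         result.append(prompt + text[old_index:])
--     return ''.join(result)
-- ===== SOURCE B (Python) =====
-- def _tail(lines):
--     if len(lines) == 1:
--         return ('... ' + lines[0]) if lines[0] else ''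
--     return '... ' + lines[0] + '\n' + _tail(lines[1:])
--
--
-- def prepend_prompt(text):
--     lines = text.split('\n')
--     if len(lines) == 1:
--         return '>>> ' + lines[0]
--     return '>>> ' + lines[0] + '\n' + _tail(lines[1:])
-- ===== Notes on version B (the rewrite author's own statement) =====
-- stated objective: simpler
-- what changed: Replaces A's stateful while-loop over text.find('\n', index) with mutable old_index/prompt/result-list state by text.split('\n') followed by a short recursion over the list of lines (first line gets '>>> ', later lines '... ', a trailing empty last line is dropped).
import Mathlib
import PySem

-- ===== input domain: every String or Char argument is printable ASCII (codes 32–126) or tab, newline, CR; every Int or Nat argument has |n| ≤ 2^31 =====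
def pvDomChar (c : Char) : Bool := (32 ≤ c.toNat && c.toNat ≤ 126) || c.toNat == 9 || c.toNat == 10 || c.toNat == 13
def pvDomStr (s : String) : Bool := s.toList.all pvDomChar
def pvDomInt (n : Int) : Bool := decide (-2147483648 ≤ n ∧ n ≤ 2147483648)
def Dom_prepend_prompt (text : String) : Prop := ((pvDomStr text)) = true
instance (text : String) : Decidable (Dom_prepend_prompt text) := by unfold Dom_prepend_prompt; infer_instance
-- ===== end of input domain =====

-- B replaces A's stateful find-loop (indices, mutable prompt, result list) by
-- split('\n') followed by a simple recursion over the list of lines; objective: simpler.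

-- ===== PORT A =====
-- A's while-loop, carried as a recursion on the not-yet-consumed suffix
-- `rest = text[index:]`: `text.find('\n', index)` becomes `find rest ['\n']`, the
-- slices `text[old_index:index]` / `text[old_index:]` become `rest.take (f.toNat+1)` / `rest`;
-- `old_index`, the current `prompt` and the `result` list are the same state as in A.
def prepend_prompt_loop (rest : List Char) (old_index : Nat) (prompt : List Char)
    (result : List (List Char)) : List Char :=
  let f := PySem.Chars.find rest ['\n']
  if _hf : f = -1 then
    if old_index = 0 ∨ rest ≠ [] then PySem.Chars.join [] (result ++ [prompt ++ rest])
    else PySem.Chars.join [] result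
  else
    prepend_prompt_loop (rest.drop (f.toNat + 1)) (old_index + (f.toNat + 1))
      ("... ".toList) (result ++ [prompt ++ rest.take (f.toNat + 1)])
termination_by rest.length
decreasing_by
  have h0 : 0 ≤ PySem.Chars.find rest ['\n'] := by
    have := PySem.Chars.neg_one_le_find rest ['\n']; omega
  have hpre := (PySem.Chars.find_spec h0).1
  have hne : rest.drop (PySem.Chars.find rest ['\n']).toNat ≠ [] := by
    intro h; rw [h] at hpre; simp at hpre
  have hk : (PySem.Chars.find rest ['\n']).toNat < rest.length := by
    by_contra h
    exact hne (List.drop_eq_nil_of_le (by omega))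
  simp only [List.length_drop]
  omega

def prepend_prompt (text : String) : String :=
  String.mk (prepend_prompt_loop text.toList 0 (">>> ".toList) [])

-- ===== PORT B =====
-- port of _tail from Source B: recursion on the list of lines after the first
def prepend_prompt_tail : List (List Char) → List Char
  | [] => []          -- unreachable: _tail is only called on a nonempty list
  | [l] => if l ≠ [] then "... ".toList ++ l else []
  | l :: ls => "... ".toList ++ l ++ '\n' :: prepend_prompt_tail ls

def prepend_prompt_alt (text : String) : String :=
  match PySem.Chars.splitOn text.toList ['\n'] with
  | [] => ""          -- unreachable: str.split never returns an empty list
  | [l] => String.mk (">>> ".toList ++ l)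
  | l :: ls => String.mk (">>> ".toList ++ l ++ '\n' :: prepend_prompt_tail ls)

-- ===== PRECONDITION & SPEC =====
def Spec_prepend_prompt (text : String) (out : String) : Prop := out = prepend_prompt_alt text
instance (text : String) (out : String) : Decidable (Spec_prepend_prompt text out) := by unfold Spec_prepend_prompt; infer_instance

-- ===== CLAIM (what is proved, stated in full; the proofs are below) =====
def Claim_equal_prepend_prompt : Prop := ∀ (text : String), Dom_prepend_prompt text → Spec_prepend_prompt text (prepend_prompt text)

-- ===== LEMMAS AND PROOFS =====

-- reference splitter: split a char list at every '\n'
def splitNl : List Char → List (List Char)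
  | [] => [[]]
  | c :: cs =>
    if c = '\n' then [] :: splitNl cs
    else
      match splitNl cs with
      | [] => [[c]]
      | l :: ls => (c :: l) :: ls

theorem splitNl_ne_nil (l : List Char) : splitNl l ≠ [] := by
  induction l with
  | nil => simp [splitNl]
  | cons c cs _ =>
    simp only [splitNl]
    split_ifs with h
    · simp
    · cases hs : splitNl cs <;> simp

-- prepend p to the head line
def consHead (p : List Char) : List (List Char) → List (List Char)
  | [] => [p]
  | l :: ls => (p ++ l) :: ls

theorem consHead_nil (xs : List (List Char)) (h : xs ≠ []) : consHead [] xs = xs := by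
  cases xs with
  | nil => exact absurd rfl h
  | cons l ls => simp [consHead]

theorem consHead_consHead (p q : List Char) (xs : List (List Char)) :
    consHead p (consHead q xs) = consHead (p ++ q) xs := by
  cases xs <;> simp [consHead]

theorem splitOn_go_eq :
    ∀ (fuel : Nat) (l cur : List Char) (acc : List (List Char)), l.length ≤ fuel →
    PySem.Chars.splitOn.go ['\n'] fuel l cur acc
      = acc.reverse ++ consHead cur.reverse (splitNl l) := by
  intro fuel
  induction fuel with
  | zero =>
    intro l cur acc h
    have hl : l = [] := List.eq_nil_of_length_eq_zero (by omega)
    subst hl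
    simp [PySem.Chars.splitOn.go, splitNl, consHead]
  | succ n ih =>
    intro l cur acc h
    cases l with
    | nil => simp [PySem.Chars.splitOn.go, splitNl, consHead]
    | cons x xs =>
      by_cases hx : x = '\n'
      · subst hx
        have hstep : PySem.Chars.splitOn.go ['\n'] (n+1) ('\n' :: xs) cur acc
            = PySem.Chars.splitOn.go ['\n'] n xs [] (cur.reverse :: acc) := by
          simp [PySem.Chars.splitOn.go, List.isPrefixOf]
        rw [hstep, ih xs [] (cur.reverse :: acc) (by simp at h; omega)]
        have hs : splitNl ('\n' :: xs) = [] :: splitNl xs := by simp [splitNl]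
        rw [hs, List.reverse_nil, consHead_nil _ (splitNl_ne_nil xs)]
        simp [consHead]
      · have hbeq : (('\n' : Char) == x) = false := by
          simp [Ne.symm hx]
        have hstep : PySem.Chars.splitOn.go ['\n'] (n+1) (x :: xs) cur acc
            = PySem.Chars.splitOn.go ['\n'] n xs (x :: cur) acc := by
          simp [PySem.Chars.splitOn.go, List.isPrefixOf, hbeq]
        rw [hstep, ih xs (x :: cur) acc (by simp at h; omega)]
        have hs : splitNl (x :: xs) = consHead [x] (splitNl xs) := by
          simp only [splitNl, if_neg hx]
          cases hval : splitNl xs with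
          | nil => exact absurd hval (splitNl_ne_nil xs)
          | cons l ls => simp [consHead]
        rw [hs, consHead_consHead]
        simp

theorem splitOn_eq (l : List Char) :
    PySem.Chars.splitOn l ['\n'] = splitNl l := by
  have := splitOn_go_eq (l.length + 1) l [] [] (by omega)
  simpa [PySem.Chars.splitOn, consHead_nil _ (splitNl_ne_nil l)] using this

theorem splitNl_of_not_mem (l : List Char) (h : '\n' ∉ l) : splitNl l = [l] := by
  induction l with
  | nil => simp [splitNl]
  | cons c cs ih =>
    simp at h
    simp only [splitNl, ih h.2]
    rw [if_neg (fun hc => h.1 hc.symm)]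

theorem splitNl_append (a b : List Char) (h : '\n' ∉ a) :
    splitNl (a ++ '\n' :: b) = a :: splitNl b := by
  induction a with
  | nil => simp [splitNl]
  | cons c cs ih =>
    simp at h
    simp only [List.cons_append, splitNl, ih h.2]
    rw [if_neg (fun hc => h.1 hc.symm)]

theorem join_nil (parts : List (List Char)) :
    PySem.Chars.join [] parts = parts.flatten := by
  induction parts with
  | nil => simp [PySem.Chars.join, List.intercalate]
  | cons p ps ih =>
    cases ps with
    | nil => simp [PySem.Chars.join, List.intercalate]
    | cons q qs =>
      simp only [PySem.Chars.join, List.intercalate, List.intersperse] at *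
      simp_all

theorem singleton_infix_of_mem (c : Char) (l : List Char) (h : c ∈ l) : [c] <:+: l := by
  obtain ⟨a, b, rfl⟩ := List.append_of_mem h
  exact ⟨a, b, by simp⟩

theorem not_mem_of_find_neg (rest : List Char)
    (hf : PySem.Chars.find rest ['\n'] = -1) : '\n' ∉ rest := by
  rw [PySem.Chars.find_eq_neg_one_iff] at hf
  exact fun hm => hf (singleton_infix_of_mem _ _ hm)

-- a '\n' found at k: decomposition of the list at the first newline
theorem find_decomp (rest : List Char) (hf : PySem.Chars.find rest ['\n'] ≠ -1) :
    (PySem.Chars.find rest ['\n']).toNat < rest.length ∧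
    '\n' ∉ rest.take (PySem.Chars.find rest ['\n']).toNat ∧
    rest = rest.take (PySem.Chars.find rest ['\n']).toNat
        ++ '\n' :: rest.drop ((PySem.Chars.find rest ['\n']).toNat + 1) ∧
    rest.take ((PySem.Chars.find rest ['\n']).toNat + 1)
        = rest.take (PySem.Chars.find rest ['\n']).toNat ++ ['\n'] := by
  have h0 : 0 ≤ PySem.Chars.find rest ['\n'] := by
    have := PySem.Chars.neg_one_le_find rest ['\n']; omega
  obtain ⟨hpre, hmin⟩ := PySem.Chars.find_spec h0
  set k := (PySem.Chars.find rest ['\n']).toNat with hk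
  obtain ⟨t, ht⟩ := hpre
  have hdk : rest.drop k = '\n' :: t := by simpa using ht.symm
  have hklt : k < rest.length := by
    by_contra h
    have : rest.drop k = [] := List.drop_eq_nil_of_le (by omega)
    rw [this] at hdk; simp at hdk
  have hdk1 : rest.drop (k + 1) = t := by
    have := List.tail_drop (l := rest) (i := k)
    rw [← this, hdk]
    rfl
  have hgk : rest[k] = '\n' := by
    have := congrArg (fun xs => xs.head?) hdk
    simp [List.head?_drop, List.getElem?_eq_getElem hklt] at this
    exact this
  refine ⟨hklt, ?_, ?_, ?_⟩
  · intro hmem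
    obtain ⟨i, hi, hgi⟩ := List.getElem_of_mem hmem
    have hil : i < k := by
      have := hi; simp [List.length_take] at this; omega
    apply hmin i hil
    have hrl : i < rest.length := by omega
    have hgir : rest[i] = '\n' := by
      have := hgi
      rwa [List.getElem_take] at this
    exact ⟨rest.drop (i+1), by
      have hde : rest.drop i = rest[i] :: rest.drop (i+1) :=
        List.drop_eq_getElem_cons hrl
      simp [hde, hgir]⟩
  · conv_lhs => rw [← List.take_append_drop k rest]
    rw [hdk, hdk1]
  · rw [List.take_add_one]
    simp [List.getElem?_eq_getElem hklt, hgk]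

-- the loop after the first iteration: old_index ≠ 0 and prompt = '... '
theorem loop_tail (n : Nat) :
    ∀ (rest : List Char), rest.length ≤ n → ∀ (old : Nat) (result : List (List Char)),
    old ≠ 0 →
    prepend_prompt_loop rest old ("... ".toList) result
      = PySem.Chars.join [] result ++ prepend_prompt_tail (splitNl rest) := by
  induction n with
  | zero =>
    intro rest hlen old result hold
    have hr : rest = [] := List.eq_nil_of_length_eq_zero (by omega)
    subst hr
    rw [prepend_prompt_loop]
    simp [PySem.Chars.find, PySem.Chars.find.go, hold, splitNl, prepend_prompt_tail, join_nil]
  | succ n ih =>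
    intro rest hlen old result hold
    rw [prepend_prompt_loop]
    by_cases hf : PySem.Chars.find rest ['\n'] = -1
    · have hnm : '\n' ∉ rest := not_mem_of_find_neg rest hf
      rw [splitNl_of_not_mem rest hnm]
      simp only [hf, dif_pos, hold, false_or]
      by_cases hr : rest = []
      · subst hr
        simp [prepend_prompt_tail, join_nil]
      · simp [hr, prepend_prompt_tail, join_nil]
    · simp only [hf, dif_neg, not_false_iff]
      obtain ⟨hklt, hnm, hdec, htake⟩ := find_decomp rest hf
      set k := (PySem.Chars.find rest ['\n']).toNat with hk
      have hlen' : (rest.drop (k+1)).length ≤ n := by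
        simp [List.length_drop]; omega
      rw [ih (rest.drop (k+1)) hlen' (old + (k+1)) _ (by omega)]
      conv_rhs => rw [hdec]
      rw [splitNl_append _ _ hnm]
      have htl : prepend_prompt_tail (rest.take k :: splitNl (rest.drop (k+1)))
          = "... ".toList ++ rest.take k ++ '\n' :: prepend_prompt_tail (splitNl (rest.drop (k+1))) := by
        cases hs : splitNl (rest.drop (k+1)) with
        | nil => exact absurd hs (splitNl_ne_nil _)
        | cons l ls => cases ls <;> simp [prepend_prompt_tail]
      rw [htl, join_nil, join_nil]
      simp [htake]

-- ===== VERDICT (by name: the statement is the Claim_ definition above) =====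
theorem prepend_prompt_spec : Claim_equal_prepend_prompt := by
  intro text _
  unfold Spec_prepend_prompt prepend_prompt prepend_prompt_alt
  rw [splitOn_eq]
  rw [prepend_prompt_loop]
  by_cases hf : PySem.Chars.find text.toList ['\n'] = -1
  · have hnm : '\n' ∉ text.toList := not_mem_of_find_neg _ hf
    rw [splitNl_of_not_mem _ hnm]
    simp [hf]
  · obtain ⟨hklt, hnm, hdec, htake⟩ := find_decomp _ hf
    set k := (PySem.Chars.find text.toList ['\n']).toNat with hk
    simp only [hf, dif_neg, not_false_iff]
    rw [loop_tail (text.toList.drop (k+1)).length _ le_rfl _ _ (by omega)]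
    conv_rhs => rw [hdec]
    rw [splitNl_append _ _ hnm]
    cases hs : splitNl (text.toList.drop (k+1)) with
    | nil => exact absurd hs (splitNl_ne_nil _)
    | cons l ls =>
      cases ls <;> simp [prepend_prompt_tail, htake]
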